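-- pv_equiv track=rewrite | github.com/daianalonso/python-UNSAM | ejercicios_python/Clase12/comparaciones_ordenamiento.py | buscar_max
-- ===== SOURCE A (Python) =====
-- def buscar_max(lista, a, b):
--     """Devuelve la posición del máximo elemento en un segmento de
--        lista de elementos comparables. También la cantidad de comparaciones que realizó.
--        La lista no debe ser vacía.
--        a y b son las posiciones inicial y final del segmento"""
--     pos_max = a
--     count = 0
--     for i in range(a + 1, b + 1):
--         count += 1
--         if lista[i] > lista[pos_max]:
--             pos_max = i
--     return pos_max, count
-- ===== SOURCE B (Python) =====
-- def buscar_max(lista, a, b):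
--     """Devuelve la posición del máximo elemento (la más a la izquierda) en el
--        segmento [a, b] de lista, y la cantidad de comparaciones realizadas.
--        Reimplementación por divide y vencerás: una comparación por combinación,
--        así count = b - a exactamente, como en la versión iterativa."""
--     if b <= a:
--         return a, 0
--     return _bm(lista, a, b)
--
-- def _bm(lista, a, b):
--     if b <= a:
--         return a, 0
--     m = (a + b) // 2
--     lp, cl = _bm(lista, a, m)
--     rp, cr = _bm(lista, m + 1, b)
--     if lista[rp] > lista[lp]:
--         return rp, cl + cr + 1
--     return lp, cl + cr + 1
-- ===== Notes on version B (the rewrite author's own statement) =====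
-- stated objective: alternative
-- what changed: Replaced the single left-to-right scan with a recursive divide-and-conquer helper that splits the segment at its midpoint and merges the two leftmost-max positions with exactly one comparison, so the count is still b - a.
import Mathlib
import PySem

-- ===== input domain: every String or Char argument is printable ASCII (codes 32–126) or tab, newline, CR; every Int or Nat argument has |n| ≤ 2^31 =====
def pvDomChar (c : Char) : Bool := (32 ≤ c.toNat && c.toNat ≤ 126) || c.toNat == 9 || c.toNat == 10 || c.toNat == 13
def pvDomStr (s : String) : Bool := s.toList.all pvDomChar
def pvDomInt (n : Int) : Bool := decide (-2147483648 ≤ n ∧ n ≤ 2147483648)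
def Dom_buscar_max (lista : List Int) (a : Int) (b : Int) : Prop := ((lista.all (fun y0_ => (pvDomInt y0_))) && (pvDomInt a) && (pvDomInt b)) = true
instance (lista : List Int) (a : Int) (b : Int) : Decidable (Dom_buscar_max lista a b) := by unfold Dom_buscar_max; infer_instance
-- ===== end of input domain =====

-- ===== PORT A =====
-- B replaces A's single left-to-right scan by midpoint divide-and-conquer (same result, same count).
def buscar_max (lista : List Int) (a : Int) (b : Int) : Int × Int :=
  (PySem.List.pyRange (a + 1) (b + 1)).foldl
    (fun (st : Int × Int) i =>
      let count := st.2 + 1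
      if PySem.List.pyGetD lista i 0 > PySem.List.pyGetD lista st.1 0 then (i, count)
      else (st.1, count))
    (a, 0)

-- ===== PORT B =====
def bmRec (lista : List Int) (a : Int) (b : Int) : Int × Int :=
  if h : b ≤ a then (a, 0)
  else
    let m := PySem.Int.floordiv (a + b) 2
    have ham : a ≤ m := (PySem.Int.le_floordiv_iff_mul_le (by norm_num)).mpr (by omega)
    have hmb : m < b := (PySem.Int.floordiv_lt_iff_lt_mul (by norm_num)).mpr (by omega)
    let l := bmRec lista a m
    let r := bmRec lista (m + 1) b
    if PySem.List.pyGetD lista r.1 0 > PySem.List.pyGetD lista l.1 0 then (r.1, l.2 + r.2 + 1)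
    else (l.1, l.2 + r.2 + 1)
termination_by (b - a).toNat
decreasing_by
  · omega
  · omega

def buscar_max_alt (lista : List Int) (a : Int) (b : Int) : Int × Int :=
  if b ≤ a then (a, 0) else bmRec lista a b

-- ===== PRECONDITION & SPEC =====
-- Pre_ excludes exactly the inputs where Python A raises IndexError: a nonempty
-- scan (a < b) whose touched indices a..b are not all valid Python indices of lista.
def Pre_buscar_max (lista : List Int) (a : Int) (b : Int) : Prop :=
  b ≤ a ∨ (-(lista.length : Int) ≤ a ∧ b < (lista.length : Int))
instance (lista : List Int) (a : Int) (b : Int) : Decidable (Pre_buscar_max lista a b) := by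
  unfold Pre_buscar_max; infer_instance
def pvWitness_buscar_max : List Int × Int × Int := ([3, 1, 4, 1, 5], 1, 4)
def Spec_buscar_max (lista : List Int) (a : Int) (b : Int) (out : Int × Int) : Prop := out = buscar_max_alt lista a b
instance (lista : List Int) (a : Int) (b : Int) (out : Int × Int) : Decidable (Spec_buscar_max lista a b out) := by unfold Spec_buscar_max; infer_instance

-- ===== CLAIM (what is proved, stated in full; the proofs are below) =====
def Claim_equal_buscar_max : Prop := ∀ (lista : List Int) (a : Int) (b : Int), Dom_buscar_max lista a b → Pre_buscar_max lista a b → Spec_buscar_max lista a b (buscar_max lista a b)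

-- ===== LEMMAS AND PROOFS =====

-- position part of A's fold, with the count stripped off
def posFold (lista : List Int) (p : Int) (l : List Int) : Int :=
  l.foldl (fun p i => if PySem.List.pyGetD lista i 0 > PySem.List.pyGetD lista p 0 then i else p) p

theorem bm_fold_eq (lista : List Int) (l : List Int) :
    ∀ (p c : Int),
      l.foldl (fun (st : Int × Int) i =>
        let count := st.2 + 1
        if PySem.List.pyGetD lista i 0 > PySem.List.pyGetD lista st.1 0 then (i, count)
        else (st.1, count)) (p, c)
      = (posFold lista p l, c + l.length) := by
  induction l with
  | nil => intro p c; simp [posFold]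
  | cons x xs ih =>
      intro p c
      simp only [List.foldl_cons, posFold]
      by_cases h : PySem.List.pyGetD lista x 0 > PySem.List.pyGetD lista p 0 <;>
        simp only [h, if_pos, if_neg, ih, posFold, List.length_cons, not_false_iff] <;> push_cast <;> ring_nf

theorem posFold_step (lista : List Int) (q z : Int) (l : List Int) :
    posFold lista q (z :: l)
      = posFold lista (if PySem.List.pyGetD lista z 0 > PySem.List.pyGetD lista q 0 then z else q) l := by
  simp [posFold]

theorem posFold_cons (lista : List Int) :
    ∀ (l : List Int) (p x : Int),
      posFold lista p (x :: l)
      = (if PySem.List.pyGetD lista (posFold lista x l) 0 > PySem.List.pyGetD lista p 0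
         then posFold lista x l else p) := by
  intro l
  induction l with
  | nil => intro p x; simp [posFold]
  | cons y ys ih =>
      intro p x
      rw [posFold_step]
      simp only [ih]
      split_ifs <;> first | rfl | omega

theorem bmRec_eq (lista : List Int) : ∀ (n : Nat) (a b : Int), (b - a).toNat = n →
    bmRec lista a b
      = (posFold lista a (PySem.List.pyRange (a + 1) (b + 1)), max (b - a) 0) := by
  intro n
  induction n using Nat.strong_induction_on with
  | _ n ih =>
    intro a b hn
    by_cases hba : b ≤ a
    · rw [bmRec, dif_pos hba]
      have hnil : PySem.List.pyRange (a + 1) (b + 1) = [] :=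
        PySem.List.pyRange_one_eq_nil (by omega)
      simp [hnil, posFold]
      omega
    · rw [bmRec, dif_neg hba]
      simp only []
      set m := PySem.Int.floordiv (a + b) 2 with hmdef
      have ham : a ≤ m := by
        rw [hmdef]; exact (PySem.Int.le_floordiv_iff_mul_le (by norm_num)).mpr (by omega)
      have hmb : m < b := by
        rw [hmdef]; exact (PySem.Int.floordiv_lt_iff_lt_mul (by norm_num)).mpr (by omega)
      have ihl := ih (m - a).toNat (by omega) a m rfl
      have ihr := ih (b - (m + 1)).toNat (by omega) (m + 1) b rfl
      have hsplit : PySem.List.pyRange (a + 1) (b + 1)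
          = PySem.List.pyRange (a + 1) (m + 1) ++ PySem.List.pyRange (m + 1) (b + 1) :=
        PySem.List.pyRange_one_append _ _ _ (by omega) (by omega)
      have hfold : posFold lista a (PySem.List.pyRange (a + 1) (b + 1))
          = posFold lista (posFold lista a (PySem.List.pyRange (a + 1) (m + 1)))
              (PySem.List.pyRange (m + 1) (b + 1)) := by
        rw [hsplit]; simp [posFold]
      have hcons : PySem.List.pyRange (m + 1) (b + 1)
          = (m + 1) :: PySem.List.pyRange (m + 1 + 1) (b + 1) :=
        PySem.List.pyRange_one_cons (by omega)
      simp only [ihl, ihr]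
      rw [hfold, hcons, posFold_cons]
      split_ifs with h <;> rw [Prod.mk.injEq] <;> exact ⟨rfl, by omega⟩

-- ===== VERDICT (by name: the statement is the Claim_ definition above) =====
theorem buscar_max_spec : Claim_equal_buscar_max := by
  intro lista a b _ _
  unfold Spec_buscar_max buscar_max buscar_max_alt
  rw [bm_fold_eq]
  by_cases hba : b ≤ a
  · rw [if_pos hba]
    have hnil : PySem.List.pyRange (a + 1) (b + 1) = [] :=
      PySem.List.pyRange_one_eq_nil (by omega)
    simp [hnil, posFold]
  · rw [if_neg hba, bmRec_eq lista (b - a).toNat a b rfl, Prod.mk.injEq]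
    refine ⟨rfl, ?_⟩
    simp only [PySem.List.length_pyRange_one]
    omega
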